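-- pv_equiv track=rewrite | github.com/orioncrocker/dsssg | build.py | get_related_posts
-- ===== SOURCE A (Python) =====
-- def get_related_posts(post, all_posts, n=3):
--     """Return up to n posts most related to the given post by shared tag count."""
--     current_tags = set(post.get('tags', []))
--     if not current_tags:
--         return []
--     scored = []
--     for other in all_posts:
--         if other['slug'] == post['slug']:
--             continue
--         shared = current_tags & set(other.get('tags', []))
--         if shared:
--             scored.append((len(shared), other))
--     scored.sort(key=lambda x: x[0], reverse=True)
--     return [p for _, p in scored[:n]]
-- ===== SOURCE B (Python) =====
-- def get_related_posts(post, all_posts, n=3):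
--     """Return up to n posts most related, via an inverted tag->post-index table."""
--     current_tags = set(post.get('tags', []))
--     if not current_tags:
--         return []
--     # inverted index: tag -> ascending indices of posts (other slug) carrying that tag
--     index = {}
--     for i, other in enumerate(all_posts):
--         if other['slug'] != post['slug']:
--             for t in dict.fromkeys(other.get('tags', [])):
--                 index.setdefault(t, []).append(i)
--     # per-post shared-tag counts, accumulated from the index buckets of the current tags
--     counts = {}
--     for t, idxs in index.items():
--         if t in current_tags:
--             for i in idxs:
--                 counts[i] = counts.get(i, 0) + 1
--     order = sorted(sorted(counts), key=lambda i: counts[i], reverse=True)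
--     return [all_posts[i] for i in order[:n]]
-- ===== Notes on version B (the rewrite author's own statement) =====
-- stated objective: alternative
-- what changed: Replaces A's per-post tag-set intersections and comparison sort of (count, post) pairs by an inverted index mapping tag -> post indices, from which per-post shared counts are accumulated bucket by bucket, and the matching indices (sorted ascending, then stably re-sorted by count descending) select the posts.
import Mathlib
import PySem

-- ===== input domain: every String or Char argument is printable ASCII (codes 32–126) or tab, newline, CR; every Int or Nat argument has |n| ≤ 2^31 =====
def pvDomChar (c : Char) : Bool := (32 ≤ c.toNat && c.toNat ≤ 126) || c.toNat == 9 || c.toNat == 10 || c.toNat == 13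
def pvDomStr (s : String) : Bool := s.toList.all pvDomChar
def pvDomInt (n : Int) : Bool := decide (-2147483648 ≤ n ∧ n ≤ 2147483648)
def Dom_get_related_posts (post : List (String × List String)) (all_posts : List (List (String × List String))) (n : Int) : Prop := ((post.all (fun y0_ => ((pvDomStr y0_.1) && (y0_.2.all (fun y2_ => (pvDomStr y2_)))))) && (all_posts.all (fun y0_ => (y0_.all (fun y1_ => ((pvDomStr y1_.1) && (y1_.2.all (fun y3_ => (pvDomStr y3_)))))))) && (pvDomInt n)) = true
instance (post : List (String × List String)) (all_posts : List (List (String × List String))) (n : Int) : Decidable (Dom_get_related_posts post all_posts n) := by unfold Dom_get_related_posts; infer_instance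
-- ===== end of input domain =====

-- B replaces A's per-post tag-set intersections and comparison sort of (count, post) pairs by an
-- inverted index tag -> post indices, per-index counts accumulated from the index buckets, and a
-- stable re-sort of the ascending matching indices by count (return value only; no mutation).

-- ===== PORT A =====
def get_related_posts (post : List (String × List String)) (all_posts : List (List (String × List String))) (n : Int) : List (List (String × List String)) :=
  let current_tags := PySem.Set.ofList (PySem.Dict.getD (PySem.Dict.mk post) "tags" [])
  if current_tags = [] then []
  else
    let scored := all_posts.foldl
      (fun scored other =>
        if PySem.Dict.get? (PySem.Dict.mk other) "slug" == PySem.Dict.get? (PySem.Dict.mk post) "slug" then scored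
        else
          let shared := PySem.Set.inter current_tags (PySem.Set.ofList (PySem.Dict.getD (PySem.Dict.mk other) "tags" []))
          if shared = [] then scored
          else scored ++ [(PySem.Set.len shared, other)]) []
    (PySem.List.slice (PySem.List.sorted scored (fun x => x.1) true) none (some n)).map (fun x => x.2)

-- ===== PORT B =====
def get_related_posts_alt (post : List (String × List String)) (all_posts : List (List (String × List String))) (n : Int) : List (List (String × List String)) :=
  let current_tags := PySem.Set.ofList (PySem.Dict.getD (PySem.Dict.mk post) "tags" [])
  if current_tags = [] then []
  else
    let index := (PySem.List.enumerate all_posts 0).foldl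
      (fun index p =>
        if !(PySem.Dict.get? (PySem.Dict.mk p.2) "slug" == PySem.Dict.get? (PySem.Dict.mk post) "slug") then
          (PySem.List.dedup (PySem.Dict.getD (PySem.Dict.mk p.2) "tags" [])).foldl
            (fun index t => index.modify t [] (fun v => v ++ [p.1])) index
        else index)
      (PySem.Dict.empty : PySem.Dict String (List Int))
    let counts := index.items.foldl
      (fun counts ti =>
        if PySem.Set.contains current_tags ti.1 then
          ti.2.foldl (fun counts i => counts.modify i 0 (fun c => c + 1)) counts
        else counts)
      (PySem.Dict.empty : PySem.Dict Int Int)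
    let order := PySem.List.sorted (PySem.List.sorted counts.keys (fun i => i) false)
      (fun i => counts.getD i 0) true
    (PySem.List.slice order none (some n)).map (fun i => PySem.List.pyGetD all_posts i [])

-- ===== PRECONDITION & SPEC =====
-- Pre_ excludes exactly the inputs where Python A raises KeyError 'slug': when the tag set is
-- non-empty, every element of all_posts must carry a "slug" key, and post itself must carry one
-- whenever all_posts is non-empty (post['slug'] is only evaluated inside the loop).
def Pre_get_related_posts (post : List (String × List String)) (all_posts : List (List (String × List String))) (_n : Int) : Prop :=
  PySem.Dict.getD (PySem.Dict.mk post) "tags" [] = [] ∨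
  ((∀ other ∈ all_posts, (PySem.Dict.get? (PySem.Dict.mk other) "slug").isSome) ∧
   (all_posts = [] ∨ (PySem.Dict.get? (PySem.Dict.mk post) "slug").isSome))
instance (post : List (String × List String)) (all_posts : List (List (String × List String))) (n : Int) : Decidable (Pre_get_related_posts post all_posts n) := by unfold Pre_get_related_posts; infer_instance

def pvWitness_get_related_posts : (List (String × List String)) × (List (List (String × List String))) × Int :=
  ([("slug", ["a"]), ("tags", ["t"])], [[("slug", ["b"]), ("tags", ["t"])]], 3)

def Spec_get_related_posts (post : List (String × List String)) (all_posts : List (List (String × List String))) (n : Int) (out : List (List (String × List String))) : Prop := out = get_related_posts_alt post all_posts n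
instance (post : List (String × List String)) (all_posts : List (List (String × List String))) (n : Int) (out : List (List (String × List String))) : Decidable (Spec_get_related_posts post all_posts n out) := by unfold Spec_get_related_posts; infer_instance

-- ===== CLAIM (what is proved, stated in full; the proofs are below) =====
def Claim_equal_get_related_posts : Prop := ∀ (post : List (String × List String)) (all_posts : List (List (String × List String))) (n : Int), Dom_get_related_posts post all_posts n → Pre_get_related_posts post all_posts n → Spec_get_related_posts post all_posts n (get_related_posts post all_posts n)

-- ===== LEMMAS AND PROOFS =====

-- shared data of the two ports
def pvOT (o : List (String × List String)) : List String :=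
  PySem.Dict.getD (PySem.Dict.mk o) "tags" []

def pvTags (post : List (String × List String)) : PySem.Set String :=
  PySem.Set.ofList (pvOT post)

def pvSD (post o : List (String × List String)) : Bool :=
  !(PySem.Dict.get? (PySem.Dict.mk o) "slug" == PySem.Dict.get? (PySem.Dict.mk post) "slug")

def pvShared (post o : List (String × List String)) : PySem.Set String :=
  PySem.Set.inter (pvTags post) (PySem.Set.ofList (pvOT o))

def pvP (post o : List (String × List String)) : Bool :=
  pvSD post o && !(decide (pvShared post o = []))

def pvF (post o : List (String × List String)) : Int × List (String × List String) :=
  (PySem.Set.len (pvShared post o), o)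

def pvScored (post : List (String × List String)) (all_posts : List (List (String × List String))) : List (Int × List (String × List String)) :=
  (all_posts.filter (pvP post)).map (pvF post)

def pvE (all_posts : List (List (String × List String))) : List (Int × List (String × List String)) :=
  PySem.List.enumerate all_posts 0

def pvQ0 (post : List (String × List String)) (all_posts : List (List (String × List String))) : List (Int × List (String × List String)) :=
  (pvE all_posts).filter (fun p => pvSD post p.2)

def pvQ (post : List (String × List String)) (all_posts : List (List (String × List String))) : List (Int × List (String × List String)) :=
  (pvE all_posts).filter (fun p => pvP post p.2)

def pvPairs (post : List (String × List String)) (all_posts : List (List (String × List String))) : List (String × Int) :=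
  (pvQ0 post all_posts).flatMap (fun p => (PySem.List.dedup (pvOT p.2)).map (fun t => (t, p.1)))

def pvCnt (post o : List (String × List String)) : Nat :=
  ((PySem.List.dedup (pvOT o)).filter (fun t => PySem.Set.contains (pvTags post) t)).length

def pvKey (post : List (String × List String)) (p : Int × List (String × List String)) : Int :=
  PySem.Set.len (pvShared post p.2)

def pvL (post : List (String × List String)) (all_posts : List (List (String × List String))) : List Int :=
  ((PySem.Set.ofList ((pvPairs post all_posts).map Prod.fst)).filter
      (fun t => PySem.Set.contains (pvTags post) t)).flatMap
    (fun t => ((pvPairs post all_posts).filter (fun q => q.1 == t)).map Prod.snd)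

def pvM (post : List (String × List String)) (all_posts : List (List (String × List String))) : List Int :=
  ((pvPairs post all_posts).filter (fun q => PySem.Set.contains (pvTags post) q.1)).map Prod.snd

-- generic lemmas about the stable reverse insertion sort
lemma pvInsertBy_map {α β : Type} (bf : β → β → Bool) (f : α → β) (x : α) (acc : List α) :
    PySem.List.insertBy bf (f x) (acc.map f)
      = (PySem.List.insertBy (fun a b => bf (f a) (f b)) x acc).map f := by
  induction acc with
  | nil => rfl
  | cons a t ih =>
      simp only [List.map_cons, PySem.List.insertBy]
      by_cases h : bf (f x) (f a)
      · simp [h]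
      · simp [h, ih]

lemma pvFoldl_ins_map {α β : Type} (key : β → Int) (f : α → β) (l : List α) :
    ∀ acc : List α,
      (l.map f).foldl (fun acc y => PySem.List.insertBy (fun a b => decide (key b < key a)) y acc) (acc.map f)
        = (l.foldl (fun acc x => PySem.List.insertBy (fun a b => decide (key (f b) < key (f a))) x acc) acc).map f := by
  induction l with
  | nil => intro acc; rfl
  | cons x t ih =>
      intro acc
      simp only [List.map_cons, List.foldl_cons]
      rw [pvInsertBy_map (fun a b => decide (key b < key a)) f x acc]
      exact ih _

lemma pvSorted_rev_map {α β : Type} (l : List α) (f : α → β) (key : β → Int) :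
    PySem.List.sorted (l.map f) key true = (PySem.List.sorted l (fun a => key (f a)) true).map f := by
  rw [PySem.List.sorted_rev_eq_foldl_insertBy, PySem.List.sorted_rev_eq_foldl_insertBy]
  simpa using pvFoldl_ins_map key f l []

lemma pvInsertBy_congr {α : Type} (k1 k2 : α → Int) (x : α) (acc : List α)
    (hx : k1 x = k2 x) (h : ∀ y ∈ acc, k1 y = k2 y) :
    PySem.List.insertBy (fun a b => decide (k1 b < k1 a)) x acc
      = PySem.List.insertBy (fun a b => decide (k2 b < k2 a)) x acc := by
  induction acc with
  | nil => rfl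
  | cons a t ih =>
      simp only [PySem.List.insertBy, hx, h a List.mem_cons_self,
        ih (fun y hy => h y (List.mem_cons_of_mem _ hy))]

lemma pvFoldl_ins_congr {α : Type} (k1 k2 : α → Int) (l : List α) (h : ∀ x ∈ l, k1 x = k2 x) :
    ∀ acc : List α, (∀ y ∈ acc, k1 y = k2 y) →
      l.foldl (fun acc x => PySem.List.insertBy (fun a b => decide (k1 b < k1 a)) x acc) acc
        = l.foldl (fun acc x => PySem.List.insertBy (fun a b => decide (k2 b < k2 a)) x acc) acc := by
  induction l with
  | nil => intro acc _; rfl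
  | cons x t ih =>
      intro acc hacc
      simp only [List.foldl_cons]
      rw [pvInsertBy_congr k1 k2 x acc (h x List.mem_cons_self) hacc]
      refine ih (fun y hy => h y (List.mem_cons_of_mem _ hy)) _ ?_
      intro y hy
      rcases (PySem.List.mem_insertBy _ _ _ _).mp hy with rfl | hy'
      · exact h y List.mem_cons_self
      · exact hacc y hy'

lemma pvSorted_rev_congr {α : Type} (l : List α) (k1 k2 : α → Int) (h : ∀ x ∈ l, k1 x = k2 x) :
    PySem.List.sorted l k1 true = PySem.List.sorted l k2 true := by
  rw [PySem.List.sorted_rev_eq_foldl_insertBy, PySem.List.sorted_rev_eq_foldl_insertBy]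
  exact pvFoldl_ins_congr k1 k2 l h [] (by intro y hy; cases hy)

-- a dict with distinct keys is its key list paired with its lookups
lemma pvItemsAux {κ ν : Type} [BEq κ] [LawfulBEq κ] (d0 : ν) :
    ∀ l : List (κ × ν), (l.map Prod.fst).Nodup →
      l = (l.map Prod.fst).map (fun k => (k, PySem.Dict.getD (PySem.Dict.mk l) k d0)) := by
  intro l
  induction l with
  | nil => intro _; rfl
  | cons a t ih =>
      obtain ⟨k, v⟩ := a
      intro h
      have h' : (k :: t.map Prod.fst).Nodup := by simpa using h
      have hk : k ∉ t.map Prod.fst := (List.nodup_cons.mp h').1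
      have ht : (t.map Prod.fst).Nodup := (List.nodup_cons.mp h').2
      simp only [List.map_cons]
      have h1 : PySem.Dict.getD (PySem.Dict.mk ((k, v) :: t)) k d0 = v := by
        show (PySem.Dict.get? (PySem.Dict.mk ((k, v) :: t)) k).getD d0 = v
        rw [PySem.Dict.get?_mk_cons]
        simp
      rw [h1]
      congr 1
      calc t = (t.map Prod.fst).map (fun k' => (k', PySem.Dict.getD (PySem.Dict.mk t) k' d0)) := ih ht
        _ = (t.map Prod.fst).map (fun k' => (k', PySem.Dict.getD (PySem.Dict.mk ((k, v) :: t)) k' d0)) := by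
            apply List.map_congr_left
            intro x hx
            have hne : ¬ (k == x) = true := by
              simp only [beq_iff_eq]
              rintro rfl
              exact hk hx
            show (x, (PySem.Dict.get? (PySem.Dict.mk t) x).getD d0)
                = (x, (PySem.Dict.get? (PySem.Dict.mk ((k, v) :: t)) x).getD d0)
            rw [PySem.Dict.get?_mk_cons, if_neg hne]

lemma pvItems_eq {κ ν : Type} [BEq κ] [LawfulBEq κ] (d : PySem.Dict κ ν) (d0 : ν) (h : d.keys.Nodup) :
    d.items = d.keys.map (fun k => (k, d.getD k d0)) := by
  cases d with
  | mk l => exact pvItemsAux d0 l h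

-- grouping a pair list by its distinct first components is a permutation of a filter
lemma pvGroup {ν : Type} (xs : List (String × ν)) (pred : String → Bool) :
    ∀ K : List String, K.Nodup →
      ((K.filter pred).flatMap (fun k => xs.filter (fun q => q.1 == k))).Perm
        (xs.filter (fun q => pred q.1 && K.contains q.1)) := by
  intro K
  induction K with
  | nil =>
      intro _
      simp
  | cons k K' ih =>
      intro hnd
      have hk : k ∉ K' := (List.nodup_cons.mp hnd).1
      have hK' : K'.Nodup := (List.nodup_cons.mp hnd).2
      by_cases hp : pred k = true
      · simp only [List.filter_cons, hp, if_true, List.flatMap_cons]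
        have hpart : (xs.filter (fun q => pred q.1 && (k :: K').contains q.1)).Perm
            ((xs.filter (fun q => pred q.1 && (k :: K').contains q.1)).filter (fun q => q.1 == k)
              ++ (xs.filter (fun q => pred q.1 && (k :: K').contains q.1)).filter (fun q => !(q.1 == k))) :=
          (List.filter_append_perm _ _).symm
        rw [List.filter_filter, List.filter_filter] at hpart
        have e1 : xs.filter (fun a => (a.1 == k) && (pred a.1 && (k :: K').contains a.1))
            = xs.filter (fun q => q.1 == k) := by
          apply List.filter_congr
          intro q _
          by_cases hq : q.1 = k
          · simp [hq, hp]
          · simp [hq]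
        have e2 : xs.filter (fun a => (!(a.1 == k)) && (pred a.1 && (k :: K').contains a.1))
            = xs.filter (fun q => pred q.1 && K'.contains q.1) := by
          apply List.filter_congr
          intro q _
          by_cases hq : q.1 = k
          · simp [hq, hk]
          · simp [hq]
        rw [e1, e2] at hpart
        exact (((ih hK').append_left (xs.filter (fun q => q.1 == k)))).trans hpart.symm
      · simp only [List.filter_cons, hp]
        have e3 : xs.filter (fun q => pred q.1 && (k :: K').contains q.1)
            = xs.filter (fun q => pred q.1 && K'.contains q.1) := by
          apply List.filter_congr
          intro q _
          by_cases hq : q.1 = k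
          · simp [hq, hp]
          · simp [hq]
        rw [e3]
        exact ih hK'

-- counting in a flatMap of replicates whose discriminators are distinct
lemma pvCount_rep {ν : Type} (g : Int × ν → Nat) :
    ∀ l : List (Int × ν), l.Pairwise (fun a b => a.1 ≠ b.1) → ∀ p0 ∈ l,
      ((l.flatMap (fun p => List.replicate (g p) p.1)).count p0.1) = g p0 := by
  intro l
  induction l with
  | nil => intro _ p0 h; cases h
  | cons a t ih =>
      intro hp p0 hmem
      have hhead : ∀ b ∈ t, a.1 ≠ b.1 := fun b hb => (List.pairwise_cons.mp hp).1 b hb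
      have htail := (List.pairwise_cons.mp hp).2
      rw [List.flatMap_cons, List.count_append]
      rcases List.mem_cons.mp hmem with rfl | hmem'
      · rw [List.count_replicate_self]
        have : (t.flatMap (fun p => List.replicate (g p) p.1)).count p0.1 = 0 := by
          rw [List.count_eq_zero]
          intro hmm
          rcases List.mem_flatMap.mp hmm with ⟨b, hb, hrep⟩
          exact hhead b hb (List.eq_of_mem_replicate hrep)
        omega
      · have hne : p0.1 ≠ a.1 := fun e => hhead p0 hmem' e.symm
        rw [List.count_replicate]
        simp only [beq_iff_eq]
        rw [if_neg (Ne.symm hne), ih htail p0 hmem']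
        omega

-- membership in the same flatMap of replicates
lemma pvMem_rep {ν : Type} (g : Int × ν → Nat) (l : List (Int × ν)) (i : Int) :
    i ∈ l.flatMap (fun p => List.replicate (g p) p.1) ↔ ∃ p ∈ l, p.1 = i ∧ 0 < g p := by
  simp only [List.mem_flatMap, List.mem_replicate]
  constructor
  · rintro ⟨p, hp, hg, rfl⟩; exact ⟨p, hp, rfl, Nat.pos_of_ne_zero hg⟩
  · rintro ⟨p, hp, rfl, hg⟩; exact ⟨p, hp, Nat.pos_iff_ne_zero.mp hg, rfl⟩

-- |a ∩ b| is symmetric for duplicate-free lists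
lemma pvInterLen (a b : List String) (ha : a.Nodup) (hb : b.Nodup) :
    (b.filter (fun x => a.contains x)).length = (a.filter (fun x => b.contains x)).length := by
  apply List.Perm.length_eq
  apply (List.perm_ext_iff_of_nodup (hb.filter _) (ha.filter _)).mpr
  intro x
  simp only [List.mem_filter, List.contains_iff_mem]
  tauto

lemma pvCnt_eq (post o : List (String × List String)) :
    pvCnt post o = (pvShared post o).length := by
  unfold pvCnt pvShared
  rw [PySem.List.dedup_eq_ofList]
  show ((PySem.Set.ofList (pvOT o)).filter (fun t => PySem.Set.contains (pvTags post) t)).length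
    = ((pvTags post).filter (fun x => (PySem.Set.ofList (pvOT o)).contains x)).length
  exact pvInterLen (pvTags post) (PySem.Set.ofList (pvOT o))
    (PySem.Set.nodup_ofList _) (PySem.Set.nodup_ofList _)

lemma pvQ_eq (post : List (String × List String)) (all_posts : List (List (String × List String))) :
    pvQ post all_posts = (pvQ0 post all_posts).filter (fun p => !(decide (pvShared post p.2 = []))) := by
  unfold pvQ pvQ0
  rw [List.filter_filter]
  apply List.filter_congr
  intro p _
  simp [pvP, Bool.and_comm]

lemma pvQ0_pairwise (post : List (String × List String)) (all_posts : List (List (String × List String))) :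
    (pvQ0 post all_posts).Pairwise (fun a b => a.1 ≠ b.1) := by
  exact ((PySem.List.pairwise_lt_enumerate all_posts 0).filter _).imp (fun h => ne_of_lt h)

lemma pvQ_pairwise (post : List (String × List String)) (all_posts : List (List (String × List String))) :
    (pvQ post all_posts).Pairwise (fun a b => a.1 < b.1) := by
  exact (PySem.List.pairwise_lt_enumerate all_posts 0).filter _

-- the slice/map exchange
lemma pvMap_slice {α β : Type} (xs : List α) (f : α → β) (n : Int) :
    (PySem.List.slice xs none (some n)).map f = PySem.List.slice (xs.map f) none (some n) := by
  simp [PySem.List.slice, PySem.List.clampIdx]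

-- closed form of port A
lemma pvA_final (post : List (String × List String)) (all_posts : List (List (String × List String))) (n : Int)
    (h0 : ¬ (PySem.Set.ofList (PySem.Dict.getD (PySem.Dict.mk post) "tags" []) = [])) :
    get_related_posts post all_posts n
      = PySem.List.slice ((PySem.List.sorted (pvQ post all_posts) (pvKey post) true).map (fun p => p.2)) none (some n) := by
  unfold get_related_posts
  simp only [h0, if_false]
  have hbody : (fun (scored : List (Int × List (String × List String))) other =>
      if PySem.Dict.get? (PySem.Dict.mk other) "slug" == PySem.Dict.get? (PySem.Dict.mk post) "slug" then scored
      else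
        let shared := PySem.Set.inter (PySem.Set.ofList (PySem.Dict.getD (PySem.Dict.mk post) "tags" []))
          (PySem.Set.ofList (PySem.Dict.getD (PySem.Dict.mk other) "tags" []))
        if shared = [] then scored
        else scored ++ [(PySem.Set.len shared, other)])
      = fun scored other => if pvP post other = true then scored ++ [pvF post other] else scored := by
    funext scored other
    by_cases h1 : (PySem.Dict.get? (PySem.Dict.mk other) "slug" == PySem.Dict.get? (PySem.Dict.mk post) "slug") = true
    · simp [h1, pvP, pvSD]
    · by_cases h2 : PySem.Set.inter (PySem.Set.ofList (PySem.Dict.getD (PySem.Dict.mk post) "tags" []))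
          (PySem.Set.ofList (PySem.Dict.getD (PySem.Dict.mk other) "tags" [])) = []
      · simp only [Bool.not_eq_true] at h1
        simp [h1, h2, pvP, pvSD, pvShared, pvTags, pvOT]
      · simp only [Bool.not_eq_true] at h1
        simp [h1, h2, pvP, pvSD, pvShared, pvF, pvTags, pvOT]
  rw [hbody, PySem.List.foldl_append_if]
  simp only [List.nil_append]
  have hsc : (all_posts.filter (pvP post)).map (pvF post)
      = (pvQ post all_posts).map (fun p => pvF post p.2) := by
    unfold pvQ pvE
    conv_lhs => rw [← PySem.List.map_snd_enumerate all_posts 0]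
    rw [List.filter_map, List.map_map]
    rfl
  rw [hsc]
  rw [pvSorted_rev_map (pvQ post all_posts) (fun p => pvF post p.2) (fun x => x.1)]
  have hkey : (fun p : Int × List (String × List String) => (pvF post p.2).1) = pvKey post := by
    funext p; simp [pvF, pvKey]
  rw [hkey, pvMap_slice, List.map_map]
  rfl

-- closed form of port B
lemma pvB_final (post : List (String × List String)) (all_posts : List (List (String × List String))) (n : Int)
    (h0 : ¬ (PySem.Set.ofList (PySem.Dict.getD (PySem.Dict.mk post) "tags" []) = [])) :
    get_related_posts_alt post all_posts n
      = PySem.List.slice ((PySem.List.sorted (pvQ post all_posts) (pvKey post) true).map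
          (fun p => PySem.List.pyGetD all_posts p.1 [])) none (some n) := by
  unfold get_related_posts_alt
  simp only [h0, if_false]
  -- the inverted index is one grouping fold over the (tag, index) pair list
  have e1 : ((PySem.List.enumerate all_posts 0).foldl
      (fun index p =>
        if !(PySem.Dict.get? (PySem.Dict.mk p.2) "slug" == PySem.Dict.get? (PySem.Dict.mk post) "slug") then
          (PySem.List.dedup (PySem.Dict.getD (PySem.Dict.mk p.2) "tags" [])).foldl
            (fun index t => index.modify t [] (fun v => v ++ [p.1])) index
        else index)
      (PySem.Dict.empty : PySem.Dict String (List Int)))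
      = (pvPairs post all_posts).foldl (fun d q => d.modify q.1 [] (fun v => v ++ [q.2])) PySem.Dict.empty := by
    rw [PySem.List.foldl_if_eq_foldl_filter]
    unfold pvPairs
    rw [List.foldl_flatMap]
    show (pvQ0 post all_posts).foldl _ _ = (pvQ0 post all_posts).foldl _ _
    apply PySem.List.foldl_congr_mem
    intro acc p _
    rw [List.foldl_map]
    rfl
  rw [e1]
  set D := (pvPairs post all_posts).foldl (fun d q => d.modify q.1 [] (fun v => v ++ [q.2]))
    (PySem.Dict.empty : PySem.Dict String (List Int)) with hD
  have hnd : D.keys.Nodup := by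
    rw [hD]
    exact PySem.Dict.nodup_keys_foldl_modify_key (pvPairs post all_posts) Prod.fst []
      (fun _ q => fun v => v ++ [q.2]) PySem.Dict.empty (by decide)
  have hkeys : D.keys = PySem.Set.ofList ((pvPairs post all_posts).map Prod.fst) := by
    rw [hD, PySem.Dict.keys_foldl_modify_key (pvPairs post all_posts) Prod.fst []
      (fun _ q => fun v => v ++ [q.2]) PySem.Dict.empty]
    simp only [PySem.Set.update, PySem.Set.ofList_eq_foldl]
    rfl
  have hgetD : ∀ t, D.getD t [] = ((pvPairs post all_posts).filter (fun q => q.1 == t)).map Prod.snd := by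
    intro t
    rw [hD, PySem.Dict.getD_foldl_modify_append]
    simp
  -- the count table is a Counter of the concatenated kept buckets
  have e2 : (D.items.foldl
      (fun counts ti =>
        if PySem.Set.contains (PySem.Set.ofList (PySem.Dict.getD (PySem.Dict.mk post) "tags" [])) ti.1 then
          ti.2.foldl (fun counts i => counts.modify i 0 (fun c => c + 1)) counts
        else counts)
      (PySem.Dict.empty : PySem.Dict Int Int))
      = PySem.Dict.counter (pvL post all_posts) := by
    rw [PySem.List.foldl_if_eq_foldl_filter, pvItems_eq D [] hnd, List.filter_map, List.foldl_map]
    rw [PySem.Dict.counter_eq_foldl]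
    unfold pvL
    rw [List.foldl_flatMap, ← hkeys]
    simp only [hgetD]
    rfl
  rw [e2]
  have hck : (PySem.Dict.counter (pvL post all_posts)).keys = PySem.Set.ofList (pvL post all_posts) :=
    PySem.Dict.keys_counter _
  rw [hck]
  -- the concatenated kept buckets are a rearrangement of the matching (tag, index) pairs
  have hLM : (pvL post all_posts).Perm (pvM post all_posts) := by
    unfold pvL pvM
    rw [← List.map_flatMap]
    refine List.Perm.map Prod.snd ?_
    refine (pvGroup (pvPairs post all_posts) (fun t => PySem.Set.contains (pvTags post) t)
      (PySem.Set.ofList ((pvPairs post all_posts).map Prod.fst)) (PySem.Set.nodup_ofList _)).trans ?_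
    have : (pvPairs post all_posts).filter
        (fun q => PySem.Set.contains (pvTags post) q.1 &&
          List.contains (PySem.Set.ofList ((pvPairs post all_posts).map Prod.fst)) q.1)
        = (pvPairs post all_posts).filter (fun q => PySem.Set.contains (pvTags post) q.1) := by
      apply List.filter_congr
      intro q hq
      have : q.1 ∈ PySem.Set.ofList ((pvPairs post all_posts).map Prod.fst) := by
        rw [PySem.Set.mem_ofList]
        exact List.mem_map.mpr ⟨q, hq, rfl⟩
      simp [this]
    rw [this]
  -- the matching pairs, grouped per post index, are replicates of the shared-tag counts
  have hM : pvM post all_posts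
      = (pvQ0 post all_posts).flatMap (fun p => List.replicate (pvCnt post p.2) p.1) := by
    unfold pvM pvPairs
    rw [List.filter_flatMap, List.map_flatMap]
    congr 1
    funext p
    rw [List.filter_map, List.map_map]
    show ((PySem.List.dedup (pvOT p.2)).filter (fun t => PySem.Set.contains (pvTags post) t)).map
        (fun _ => p.1) = _
    rw [List.map_const']
    rfl
  -- counts of a matching index: the shared-tag count of its post
  have hkeyeq : ∀ p ∈ pvQ post all_posts,
      ((pvL post all_posts).count p.1 : Int) = pvKey post p := by
    intro p hp
    have hp0 : p ∈ pvQ0 post all_posts := by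
      rw [pvQ_eq] at hp
      exact (List.mem_filter.mp hp).1
    rw [hLM.count_eq, hM, pvCount_rep (fun p => pvCnt post p.2) (pvQ0 post all_posts)
      (pvQ0_pairwise post all_posts) p hp0, pvCnt_eq]
    rfl
  -- the ascending key sort is the ascending list of matching indices
  have hInodup : ((pvQ post all_posts).map Prod.fst).Nodup :=
    List.pairwise_map.mpr ((pvQ_pairwise post all_posts).imp (fun h => ne_of_lt h))
  have hmem : ∀ i, i ∈ (pvQ post all_posts).map Prod.fst ↔ i ∈ PySem.Set.ofList (pvL post all_posts) := by
    intro i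
    rw [PySem.Set.mem_ofList, hLM.mem_iff, hM, pvMem_rep]
    rw [List.mem_map]
    constructor
    · rintro ⟨p, hp, rfl⟩
      rw [pvQ_eq] at hp
      rcases List.mem_filter.mp hp with ⟨hp0, hsh⟩
      refine ⟨p, hp0, rfl, ?_⟩
      rw [pvCnt_eq]
      simp only [Bool.not_eq_eq_eq_not, Bool.not_true, decide_eq_false_iff_not] at hsh
      exact List.length_pos_of_ne_nil hsh
    · rintro ⟨p, hp0, rfl, hcnt⟩
      refine ⟨p, ?_, rfl⟩
      rw [pvQ_eq, List.mem_filter]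
      refine ⟨hp0, ?_⟩
      rw [pvCnt_eq] at hcnt
      simp only [Bool.not_eq_eq_eq_not, Bool.not_true, decide_eq_false_iff_not]
      exact List.ne_nil_of_length_pos hcnt
  have hsortKeys : PySem.List.sorted (PySem.Set.ofList (pvL post all_posts)) (fun i => i) false
      = (pvQ post all_posts).map Prod.fst := by
    apply PySem.List.sorted_eq_of_perm_of_pairwise_lt
    · exact (List.perm_ext_iff_of_nodup hInodup (PySem.Set.nodup_ofList _)).mpr hmem
    · exact List.pairwise_map.mpr (pvQ_pairwise post all_posts)
  rw [hsortKeys]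
  have hgd : (fun i => (PySem.Dict.counter (pvL post all_posts)).getD i 0)
      = fun i => ((pvL post all_posts).count i : Int) :=
    funext (fun i => PySem.Dict.getD_counter _ i)
  rw [hgd]
  rw [pvSorted_rev_map (pvQ post all_posts) Prod.fst (fun i => ((pvL post all_posts).count i : Int))]
  rw [pvSorted_rev_congr (pvQ post all_posts) _ (pvKey post) hkeyeq]
  rw [pvMap_slice, List.map_map]
  rfl

-- ===== VERDICT (by name: the statement is the Claim_ definition above) =====
theorem get_related_posts_spec : Claim_equal_get_related_posts := by
  intro post all_posts n _dom _pre
  unfold Spec_get_related_posts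
  by_cases h0 : PySem.Set.ofList (PySem.Dict.getD (PySem.Dict.mk post) "tags" []) = []
  · unfold get_related_posts get_related_posts_alt
    simp [h0]
  · rw [pvA_final post all_posts n h0, pvB_final post all_posts n h0]
    congr 1
    apply List.map_congr_left
    intro p hp
    have hpE : p ∈ PySem.List.enumerate all_posts 0 := by
      have h1 := (PySem.List.mem_sorted _ _ _ _).mp hp
      exact (List.mem_filter.mp h1).1
    rcases (PySem.List.mem_enumerate_iff _ _ _).mp hpE with ⟨k, hk, rfl⟩
    show all_posts[k] = PySem.List.pyGetD all_posts ((0 : Int) + (k : Int)) []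
    rw [zero_add, PySem.List.pyGetD_natCast]
    exact (List.getD_eq_getElem _ _ hk).symm
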